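-- pv_equiv track=rewrite | github.com/isyuricunha/age-of-wonders-4-traducao-portugues-brasileiro | mo_convert.py | _po_quote
-- ===== SOURCE A (Python) =====
-- from typing import Dict, List, Optional, Tuple
--
-- def _po_escape(s: str) -> str:
--     s = s.replace("\\", "\\\\")
--     s = s.replace('"', '\\"')
--     s = s.replace("\t", "\\t")
--     s = s.replace("\r", "\\r")
--     s = s.replace("\n", "\\n")
--     return s
--
-- def _po_quote(s: str) -> List[str]:
--     if s == "":
--         return ['""']
--
--     parts = s.split("\n")
--     lines: List[str] = []
--     for i, part in enumerate(parts):
--         if i < len(parts) - 1: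
--             lines.append('"' + _po_escape(part + "\n") + '"')
--         else:
--             lines.append('"' + _po_escape(part) + '"')
--     return lines
-- ===== SOURCE B (Python) =====
-- from typing import List
--
-- def _po_quote(s: str) -> List[str]:
--     esc = {'\\': '\\\\', '"': '\\"', '\t': '\\t', '\r': '\\r'}
--     out: List[str] = []
--     buf = ''
--     for c in s:
--         if c == '\n':
--             out.append('"' + buf + '\\n' + '"')
--             buf = ''
--         else:
--             buf += esc.get(c, c)
--     out.append('"' + buf + '"')
--     return out
-- ===== Notes on version B (the rewrite author's own statement) =====
-- stated objective: alternative
-- what changed: A escapes the whole string with five sequential str.replace passes, splits on newline, then loops with enumerate and an index-vs-length test; B makes one left-to-right scan over the characters, escaping each via a dict and flushing a quoted line buffer at every newline.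
import Mathlib
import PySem

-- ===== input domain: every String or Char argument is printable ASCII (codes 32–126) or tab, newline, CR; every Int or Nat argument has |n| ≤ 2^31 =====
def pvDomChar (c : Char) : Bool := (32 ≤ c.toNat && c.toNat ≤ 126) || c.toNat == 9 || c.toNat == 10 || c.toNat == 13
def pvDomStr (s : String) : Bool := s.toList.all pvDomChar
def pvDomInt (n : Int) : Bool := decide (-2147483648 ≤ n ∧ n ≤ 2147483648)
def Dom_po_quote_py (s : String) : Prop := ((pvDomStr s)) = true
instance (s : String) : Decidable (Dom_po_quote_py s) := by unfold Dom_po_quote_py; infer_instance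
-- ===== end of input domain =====

-- B replaces A's escape-whole-string-then-split-then-loop pipeline by a single left-to-right
-- scan that escapes each character and flushes a line buffer at every newline (objective: alternative).

-- ===== PORT A =====
-- literal port of _po_escape: five successive str.replace passes
def po_escape_py (s : String) : String :=
  let s1 := PySem.Str.replace s "\\" "\\\\"
  let s2 := PySem.Str.replace s1 "\"" "\\\""
  let s3 := PySem.Str.replace s2 "\t" "\\t"
  let s4 := PySem.Str.replace s3 "\r" "\\r"
  let s5 := PySem.Str.replace s4 "\n" "\\n"
  s5

-- literal port of _po_quote: empty guard, split on "\n", enumerate loop appending one line each turn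
def po_quote_py (s : String) : List String :=
  if s = "" then ["\"\""] else
  -- s.split("\n"): sep is nonempty so Str.split? always returns some; getD is never taken
  let parts : List String := (PySem.Str.split? s "\n").getD []
  (PySem.List.enumerate parts).foldl
    (fun lines ip =>
      if ip.1 < (parts.length : Int) - 1 then
        lines ++ ["\"" ++ po_escape_py (ip.2 ++ "\n") ++ "\""]
      else
        lines ++ ["\"" ++ po_escape_py ip.2 ++ "\""]) []

-- ===== PORT B =====
-- Source B's esc dict lookup esc.get(c, c)
def escB (c : Char) : List Char :=
  if c = '\\' then ['\\', '\\']
  else if c = '"' then ['\\', '"']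
  else if c = '\t' then ['\\', 't']
  else if c = '\r' then ['\\', 'r']
  else [c]

-- single scan: buffer of escaped chars, flushed as a quoted line at each newline
def po_quote_py_alt (s : String) : List String :=
  let r := s.toList.foldl
    (fun (st : List Char × List String) c =>
      if c = '\n' then ([], st.2 ++ [String.ofList ('"' :: st.1 ++ ['\\', 'n', '"'])])
      else (st.1 ++ escB c, st.2)) ([], [])
  r.2 ++ [String.ofList ('"' :: r.1 ++ ['"'])]

-- ===== PRECONDITION & SPEC =====
def Spec_po_quote_py (s : String) (out : List String) : Prop := out = po_quote_py_alt s
instance (s : String) (out : List String) : Decidable (Spec_po_quote_py s out) := by unfold Spec_po_quote_py; infer_instance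

-- ===== CLAIM (what is proved, stated in full; the proofs are below) =====
def Claim_equal_po_quote_py : Prop := ∀ (s : String), Dom_po_quote_py s → Spec_po_quote_py s (po_quote_py s)

-- ===== LEMMAS AND PROOFS =====

-- the combined per-character escape (escB plus the '\n' case)
def escF (c : Char) : List Char :=
  if c = '\\' then ['\\', '\\']
  else if c = '"' then ['\\', '"']
  else if c = '\t' then ['\\', 't']
  else if c = '\r' then ['\\', 'r']
  else if c = '\n' then ['\\', 'n']
  else [c]

def consHead (p : List Char) : List (List Char) → List (List Char)
  | [] => [p]
  | q :: qs => (p ++ q) :: qs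

-- splitting on one character, structurally
def split1 (a : Char) : List Char → List (List Char)
  | [] => [[]]
  | c :: cs => if c = a then [] :: split1 a cs else consHead [c] (split1 a cs)

-- recursive description of B's scan from buffer buf
def bRun (buf : List Char) : List Char → List String
  | [] => [String.ofList ('"' :: buf ++ ['"'])]
  | c :: cs =>
    if c = '\n' then String.ofList ('"' :: buf ++ ['\\', 'n', '"']) :: bRun [] cs
    else bRun (buf ++ escB c) cs

-- the common shape: quoted escaped lines of the pieces, first piece prefixed by buf
def quoteLines (buf : List Char) : List (List Char) → List String
  | [] => []
  | [p] => [String.ofList ('"' :: (buf ++ p.flatMap escF) ++ ['"'])]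
  | p :: ps => String.ofList ('"' :: (buf ++ p.flatMap escF ++ ['\\', 'n']) ++ ['"']) :: quoteLines [] ps

theorem replace_go_step (a c : Char) (new t acc : List Char) (f : Nat) :
    PySem.Chars.replace.go [a] new (f+1) (c :: t) acc
      = if a = c then PySem.Chars.replace.go [a] new f t (new.reverse ++ acc)
        else PySem.Chars.replace.go [a] new f t (c :: acc) := by
  simp [PySem.Chars.replace.go, List.isPrefixOf]

theorem replace_go_single (a : Char) (new : List Char) :
    ∀ (l : List Char) (fuel : Nat) (acc : List Char), l.length ≤ fuel →
      PySem.Chars.replace.go [a] new fuel l acc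
        = acc.reverse ++ l.flatMap (fun c => if c = a then new else [c]) := by
  intro l
  induction l with
  | nil => intro fuel acc _; cases fuel <;> simp [PySem.Chars.replace.go]
  | cons c t ih =>
    intro fuel acc h
    cases fuel with
    | zero => simp at h
    | succ f =>
      simp only [List.length_cons, Nat.succ_le_succ_iff] at h
      rw [replace_go_step]
      by_cases hc : a = c
      · subst hc
        rw [if_pos rfl, ih f _ h]
        simp [List.flatMap_cons]
      · rw [if_neg hc, ih f _ h]
        simp [List.flatMap_cons, if_neg (fun hh : c = a => hc hh.symm)]

theorem replace_single (a : Char) (new l : List Char) :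
    PySem.Chars.replace l [a] new = l.flatMap (fun c => if c = a then new else [c]) := by
  simpa [PySem.Chars.replace] using replace_go_single a new l l.length [] le_rfl

theorem consHead_ne_nil (p : List Char) (l : List (List Char)) : consHead p l ≠ [] := by
  cases l <;> simp [consHead]

theorem split1_ne_nil (a : Char) (l : List Char) : split1 a l ≠ [] := by
  cases l with
  | nil => simp [split1]
  | cons c cs =>
    simp only [split1]
    split
    · simp
    · exact consHead_ne_nil _ _

theorem consHead_nil (l : List (List Char)) (h : l ≠ []) : consHead [] l = l := by
  cases l with
  | nil => exact absurd rfl h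
  | cons q qs => simp [consHead]

theorem consHead_consHead (p q : List Char) (l : List (List Char)) :
    consHead p (consHead q l) = consHead (p ++ q) l := by
  cases l <;> simp [consHead, List.append_assoc]

theorem splitOn_go_step (a c : Char) (t cur : List Char) (acc : List (List Char)) (f : Nat) :
    PySem.Chars.splitOn.go [a] (f+1) (c :: t) cur acc
      = if a = c then PySem.Chars.splitOn.go [a] f t [] (cur.reverse :: acc)
        else PySem.Chars.splitOn.go [a] f t (c :: cur) acc := by
  simp [PySem.Chars.splitOn.go, List.isPrefixOf]

theorem splitOn_go_single (a : Char) :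
    ∀ (l : List Char) (fuel : Nat) (cur : List Char) (acc : List (List Char)), l.length ≤ fuel →
      PySem.Chars.splitOn.go [a] fuel l cur acc
        = acc.reverse ++ consHead cur.reverse (split1 a l) := by
  intro l
  induction l with
  | nil => intro fuel cur acc _; cases fuel <;> simp [PySem.Chars.splitOn.go, split1, consHead]
  | cons c t ih =>
    intro fuel cur acc h
    cases fuel with
    | zero => simp at h
    | succ f =>
      simp only [List.length_cons, Nat.succ_le_succ_iff] at h
      rw [splitOn_go_step]
      by_cases hc : a = c
      · subst hc
        rw [if_pos rfl, ih f _ _ h]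
        simp only [List.reverse_nil, List.reverse_cons]
        rw [show split1 a (a :: t) = [] :: split1 a t from by simp [split1],
          consHead_nil _ (split1_ne_nil a t)]
        simp [consHead]
      · have hca : c ≠ a := fun hh => hc hh.symm
        rw [if_neg hc, ih f _ _ h,
          show split1 a (c :: t) = consHead [c] (split1 a t) from by simp [split1, hca],
          consHead_consHead]
        simp

theorem splitOn_single (a : Char) (l : List Char) :
    PySem.Chars.splitOn l [a] = split1 a l := by
  rw [PySem.Chars.splitOn, splitOn_go_single a l (l.length + 1) [] [] (by omega)]
  simp only [List.reverse_nil, List.nil_append]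
  exact consHead_nil _ (split1_ne_nil a l)

theorem po_escape_toList (s : String) :
    (po_escape_py s).toList = s.toList.flatMap escF := by
  simp only [po_escape_py, PySem.Str.toList_replace]
  have hbs : ("\\" : String).toList = ['\\'] := by decide
  have hbb : ("\\\\" : String).toList = ['\\', '\\'] := by decide
  have hq : ("\"" : String).toList = ['"'] := by decide
  have hbq : ("\\\"" : String).toList = ['\\', '"'] := by decide
  have ht : ("\t" : String).toList = ['\t'] := by decide
  have hbt : ("\\t" : String).toList = ['\\', 't'] := by decide
  have hr : ("\r" : String).toList = ['\r'] := by decide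
  have hbr : ("\\r" : String).toList = ['\\', 'r'] := by decide
  have hn : ("\n" : String).toList = ['\n'] := by decide
  have hbn : ("\\n" : String).toList = ['\\', 'n'] := by decide
  rw [hbs, hbb, hq, hbq, ht, hbt, hr, hbr, hn, hbn]
  rw [replace_single, replace_single, replace_single, replace_single, replace_single]
  rw [List.flatMap_assoc, List.flatMap_assoc, List.flatMap_assoc, List.flatMap_assoc]
  congr 1
  funext c
  by_cases h1 : c = '\\'; · subst h1; decide
  by_cases h2 : c = '"'; · subst h2; decide
  by_cases h3 : c = '\t'; · subst h3; decide
  by_cases h4 : c = '\r'; · subst h4; decide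
  by_cases h5 : c = '\n'; · subst h5; decide
  simp [escF, h1, h2, h3, h4, h5]

-- A's enumerate loop, as a map, equals the quoted lines of the pieces
theorem escB_eq_escF (c : Char) (h : c ≠ '\n') : escB c = escF c := by
  simp [escB, escF, h]

theorem escF_newline : escF '\n' = ['\\', 'n'] := by decide

theorem quoteLines_consHead (c : Char) (buf : List Char) (l : List (List Char)) (hl : l ≠ []) :
    quoteLines buf (consHead [c] l) = quoteLines (buf ++ escF c) l := by
  cases l with
  | nil => exact absurd rfl hl
  | cons p ps =>
    cases ps with
    | nil => simp [quoteLines, consHead, List.flatMap_cons, List.append_assoc]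
    | cons q qs => simp [quoteLines, consHead, List.flatMap_cons, List.append_assoc]

theorem quote_str_eq (x : String) (l : List Char) (h : x.toList = l) :
    "\"" ++ x ++ "\"" = String.ofList ('"' :: l ++ ['"']) := by
  apply String.toList_inj.mp
  simp [h]

theorem mapA (pieces : List (List Char)) :
    ∀ (k n : Int), n = k + pieces.length → pieces ≠ [] →
      (PySem.List.enumerate (pieces.map String.ofList) k).map
        (fun ip => if ip.1 < n - 1 then "\"" ++ po_escape_py (ip.2 ++ "\n") ++ "\""
                   else "\"" ++ po_escape_py ip.2 ++ "\"")
        = quoteLines [] pieces := by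
  induction pieces with
  | nil => intro k n _ hne; exact absurd rfl hne
  | cons p ps ih =>
    intro k n hn _
    cases ps with
    | nil =>
      simp only [List.map_cons, List.map_nil, PySem.List.enumerate_cons, PySem.List.enumerate_nil,
        List.length_cons, List.length_nil] at hn ⊢
      have hcond : ¬ ((k : Int) < n - 1) := by omega
      simp only [hcond, if_neg, not_false_iff]
      rw [quote_str_eq _ (p.flatMap escF) (by simp [po_escape_toList])]
      simp [quoteLines]
    | cons q qs =>
      simp only [List.length_cons] at hn
      rw [List.map_cons, PySem.List.enumerate_cons, List.map_cons]
      have hcond : (k : Int) < n - 1 := by omega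
      rw [if_pos hcond, ih (k+1) n (by simp only [List.length_cons]; omega) (by simp)]
      have hesc : (po_escape_py (String.ofList p ++ "\n")).toList
          = p.flatMap escF ++ ['\\', 'n'] := by
        rw [po_escape_toList]
        have : (String.ofList p ++ "\n").toList = p ++ ['\n'] := by
          simp [show ("\n" : String).toList = ['\n'] from by decide]
        rw [this, List.flatMap_append]
        simp [escF_newline]
      rw [quote_str_eq _ (p.flatMap escF ++ ['\\', 'n']) hesc]
      simp [quoteLines]

theorem foldB (cs : List Char) :
    ∀ (buf : List Char) (out : List String),
      (cs.foldl
          (fun (st : List Char × List String) c =>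
            if c = '\n' then ([], st.2 ++ [String.ofList ('"' :: st.1 ++ ['\\', 'n', '"'])])
            else (st.1 ++ escB c, st.2)) (buf, out)).2
        ++ [String.ofList ('"' :: (cs.foldl
          (fun (st : List Char × List String) c =>
            if c = '\n' then ([], st.2 ++ [String.ofList ('"' :: st.1 ++ ['\\', 'n', '"'])])
            else (st.1 ++ escB c, st.2)) (buf, out)).1 ++ ['"'])]
      = out ++ bRun buf cs := by
  induction cs with
  | nil => intro buf out; simp [bRun]
  | cons c cs ih =>
    intro buf out
    by_cases hc : c = '\n'
    · subst hc
      simp only [List.foldl_cons, if_pos]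
      rw [ih]
      simp [bRun]
    · simp only [List.foldl_cons, if_neg hc]
      rw [ih]
      simp [bRun, hc]

theorem bRun_split1 (cs : List Char) :
    ∀ (buf : List Char), bRun buf cs = quoteLines buf (split1 '\n' cs) := by
  induction cs with
  | nil => intro buf; simp [bRun, split1, quoteLines]
  | cons c cs ih =>
    intro buf
    by_cases hc : c = '\n'
    · subst hc
      rw [show bRun buf ('\n' :: cs) = String.ofList ('"' :: buf ++ ['\\', 'n', '"']) :: bRun [] cs
          from by simp [bRun]]
      rw [ih, show split1 '\n' ('\n' :: cs) = [] :: split1 '\n' cs from by simp [split1]]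
      obtain ⟨q, qs, hq⟩ := List.exists_cons_of_ne_nil (split1_ne_nil '\n' cs)
      rw [hq]
      simp [quoteLines]
    · rw [show bRun buf (c :: cs) = bRun (buf ++ escB c) cs from by simp [bRun, hc]]
      rw [ih, show split1 '\n' (c :: cs) = consHead [c] (split1 '\n' cs) from by simp [split1, hc]]
      rw [quoteLines_consHead _ _ _ (split1_ne_nil '\n' cs), escB_eq_escF c hc]

theorem A_loop (N : Int) (l : List (Int × String)) :
    ∀ (acc : List String),
      l.foldl (fun lines ip =>
        if ip.1 < N - 1 then lines ++ ["\"" ++ po_escape_py (ip.2 ++ "\n") ++ "\""]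
        else lines ++ ["\"" ++ po_escape_py ip.2 ++ "\""]) acc
      = acc ++ l.map (fun ip =>
        if ip.1 < N - 1 then "\"" ++ po_escape_py (ip.2 ++ "\n") ++ "\""
        else "\"" ++ po_escape_py ip.2 ++ "\"") := by
  induction l with
  | nil => intro acc; simp
  | cons x xs ihl =>
    intro acc
    simp only [List.foldl_cons, List.map_cons]
    by_cases hx : x.1 < N - 1
    · rw [if_pos hx, ihl, if_pos hx]; simp
    · rw [if_neg hx, ihl, if_neg hx]; simp

-- ===== VERDICT =====
theorem po_quote_py_spec : Claim_equal_po_quote_py := by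
  intro s _
  unfold Spec_po_quote_py
  by_cases hs : s = ""
  · subst hs; decide
  · have hsplit : PySem.Str.split? s "\n" = some ((split1 '\n' s.toList).map String.ofList) := by
      rw [PySem.Str.split?, show ("\n" : String).toList = ['\n'] from by decide]
      simp [PySem.Chars.split?, splitOn_single]
    rw [po_quote_py, if_neg hs, hsplit]
    simp only [Option.getD_some]
    have h1 := A_loop (((split1 '\n' s.toList).map String.ofList).length : Int)
      (PySem.List.enumerate ((split1 '\n' s.toList).map String.ofList)) []
    refine h1.trans ?_
    simp only [List.nil_append]
    rw [show (((split1 '\n' s.toList).map String.ofList).length : Int)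
        = ((split1 '\n' s.toList).length : Int) from by simp]
    rw [mapA (split1 '\n' s.toList) 0 ((split1 '\n' s.toList).length : Int) (by simp)
      (split1_ne_nil '\n' s.toList)]
    rw [po_quote_py_alt]
    have := foldB s.toList [] []
    simp only [List.nil_append] at this
    rw [this, bRun_split1]
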